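-- pv_equiv track=rewrite | github.com/Naman195/DSA_Practice | problemOfTheDay/Surround the 1's.py | SurroundByOnes
-- ===== SOURCE A (Python) =====
-- def isEvenZeroSurrounding(matrix, row, col):
--     Zero_Count = 0
--     directions = [[1,0],[-1,0],[0,1],[0,-1],[1,1],[-1,-1],[1,-1],[-1,1]]
--
--     for direction in directions:
--         new_row = row + direction[0]
--         new_col = col + direction[1]
--
--         if new_row >= 0 and new_row < len(matrix) and new_col >= 0 and new_col < len(matrix[0]) and matrix[new_row][new_col] == 0:
--             Zero_Count += 1
--
--     return Zero_Count % 2 == 0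
--
-- def SurroundByOnes(matrix):
--
--
--
--     count = 0
--     if len(matrix) == 1 and len(matrix[0]) == 1:
--         return 0
--     for row in range(len(matrix)):
--         for col in range(len(matrix[0])):
--             if matrix[row][col] == 1:
--                 if isEvenZeroSurrounding(matrix, row, col):
--                     count += 1
--
--     return count
-- ===== SOURCE B (Python) =====
-- def SurroundByOnes(matrix):
--     rows = len(matrix)
--     if rows == 0:
--         return 0
--     cols = len(matrix[0])
--     if rows == 1 and cols == 1:
--         return 0
--     # scatter pass: each zero cell adds 1 to every in-bounds neighbour's counter
--     grid = [[0] * cols for _ in range(rows)]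
--     for r in range(rows):
--         for c in range(cols):
--             if matrix[r][c] == 0:
--                 for dr in (-1, 0, 1):
--                     for dc in (-1, 0, 1):
--                         if (dr or dc) and 0 <= r + dr < rows and 0 <= c + dc < cols:
--                             grid[r + dr][c + dc] += 1
--     count = 0
--     for r in range(rows):
--         for c in range(cols):
--             if matrix[r][c] == 1 and grid[r][c] % 2 == 0:
--                 count += 1
--     return count
-- ===== Notes on version B (the rewrite author's own statement) =====
-- stated objective: alternative
-- what changed: Replaced the per-1-cell gather of 8 neighbour probes with a two-pass scatter algorithm: one pass lets every zero cell increment a counter grid at its in-bounds neighbours, a second pass counts the 1-cells whose counter is even.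
import Mathlib
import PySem

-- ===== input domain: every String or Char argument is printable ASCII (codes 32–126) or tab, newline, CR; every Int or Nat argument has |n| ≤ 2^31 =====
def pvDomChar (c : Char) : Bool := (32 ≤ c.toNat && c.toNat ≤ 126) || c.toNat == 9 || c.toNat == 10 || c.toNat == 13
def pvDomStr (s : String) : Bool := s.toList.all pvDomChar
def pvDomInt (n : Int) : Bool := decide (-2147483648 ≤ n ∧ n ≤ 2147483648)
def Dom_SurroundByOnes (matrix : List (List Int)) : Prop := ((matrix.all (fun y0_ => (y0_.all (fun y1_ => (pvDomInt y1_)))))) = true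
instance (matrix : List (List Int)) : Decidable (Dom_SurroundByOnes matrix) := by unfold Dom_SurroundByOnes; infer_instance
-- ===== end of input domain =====

-- B replaces the per-1-cell gather of 8 neighbour probes by a two-pass scatter:
-- every zero cell increments a counter grid at its in-bounds neighbours, then the
-- 1-cells with an even counter are counted (alternative algorithm, same asymptotic cost).


-- ===== PORT A =====
def pvDirs : List (Int × Int) := [(1,0),(-1,0),(0,1),(0,-1),(1,1),(-1,-1),(1,-1),(-1,1)]

def isEvenZeroSurrounding (matrix : List (List Int)) (row col : Int) : Bool :=
  let zc : Int := pvDirs.foldl (fun zc d =>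
    if 0 ≤ row + d.1 ∧ row + d.1 < (matrix.length : Int) ∧ 0 ≤ col + d.2 ∧
        col + d.2 < (((PySem.List.pyGet? matrix 0).getD []).length : Int) ∧
        (PySem.List.pyGet? ((PySem.List.pyGet? matrix (row + d.1)).getD []) (col + d.2)).getD 0 = 0
    then zc + 1 else zc) 0
  decide (PySem.Int.mod zc 2 = 0)

def SurroundByOnes (matrix : List (List Int)) : Int :=
  if matrix.length = 1 ∧ ((PySem.List.pyGet? matrix 0).getD []).length = 1 then 0 else
  (PySem.List.pyRange 0 (matrix.length : Int) 1).foldl (fun count row =>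
    (PySem.List.pyRange 0 (((PySem.List.pyGet? matrix 0).getD []).length : Int) 1).foldl (fun count col =>
      if (PySem.List.pyGet? ((PySem.List.pyGet? matrix row).getD []) col).getD 0 = 1 then
        if isEvenZeroSurrounding matrix row col then count + 1 else count
      else count) count) 0

-- ===== PORT B =====
def pvOffs : List Int := [-1, 0, 1]

def pvBump (g : List (List Int)) (r c : Int) : List (List Int) :=
  g.modify r.toNat (fun row => row.modify c.toNat (· + 1))

def SurroundByOnes_alt (matrix : List (List Int)) : Int :=
  let rows : Int := matrix.length
  if rows = 0 then 0 else
  let cols : Int := ((PySem.List.pyGet? matrix 0).getD []).length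
  if rows = 1 ∧ cols = 1 then 0 else
  let grid := (PySem.List.pyRange 0 rows 1).foldl (fun g r =>
    (PySem.List.pyRange 0 cols 1).foldl (fun g c =>
      if (PySem.List.pyGet? ((PySem.List.pyGet? matrix r).getD []) c).getD 0 = 0 then
        pvOffs.foldl (fun g dr =>
          pvOffs.foldl (fun g dc =>
            if ¬(dr = 0 ∧ dc = 0) ∧ 0 ≤ r + dr ∧ r + dr < rows ∧ 0 ≤ c + dc ∧ c + dc < cols then
              pvBump g (r + dr) (c + dc)
            else g) g) g
      else g) g)
    (List.replicate rows.toNat (List.replicate cols.toNat (0 : Int)))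
  (PySem.List.pyRange 0 rows 1).foldl (fun count r =>
    (PySem.List.pyRange 0 cols 1).foldl (fun count c =>
      if (PySem.List.pyGet? ((PySem.List.pyGet? matrix r).getD []) c).getD 0 = 1 ∧
          PySem.Int.mod ((PySem.List.pyGet? ((PySem.List.pyGet? grid r).getD []) c).getD 0) 2 = 0
      then count + 1 else count) count) 0

-- ===== PRECONDITION & SPEC =====
-- Pre_ excludes exactly the matrices on which the Python A raises IndexError: a row
-- shorter than the first row makes matrix[row][col] (col < len(matrix[0])) raise.
def Pre_SurroundByOnes (matrix : List (List Int)) : Prop :=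
  ∀ row ∈ matrix, (matrix.headD []).length ≤ row.length
instance (matrix : List (List Int)) : Decidable (Pre_SurroundByOnes matrix) := by
  unfold Pre_SurroundByOnes; infer_instance

def pvWitness_SurroundByOnes : List (List Int) := [[1, 0], [0, 1]]

def Spec_SurroundByOnes (matrix : List (List Int)) (out : Int) : Prop := out = SurroundByOnes_alt matrix
instance (matrix : List (List Int)) (out : Int) : Decidable (Spec_SurroundByOnes matrix out) := by unfold Spec_SurroundByOnes; infer_instance

-- ===== CLAIM (what is proved, stated in full; the proofs are below) =====
def Claim_equal_SurroundByOnes : Prop := ∀ (matrix : List (List Int)), Dom_SurroundByOnes matrix → Pre_SurroundByOnes matrix → Spec_SurroundByOnes matrix (SurroundByOnes matrix)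

-- ===== LEMMAS AND PROOFS =====

-- proof-side abbreviations for the two programs' primitive notions
def pvEnt (g : List (List Int)) (r c : Int) : Int :=
  (PySem.List.pyGet? ((PySem.List.pyGet? g r).getD []) c).getD 0

def pvShape (g : List (List Int)) (R C : Int) : Prop :=
  (g.length : Int) = R ∧ ∀ (n : Nat) (h : n < g.length), (g[n].length : Int) = C

def pvPairs9 : List (Int × Int) :=
  [(-1,-1),(-1,0),(-1,1),(0,-1),(0,0),(0,1),(1,-1),(1,0),(1,1)]

abbrev pvInbZ (matrix : List (List Int)) (R C a b : Int) : Prop :=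
  0 ≤ a ∧ a < R ∧ 0 ≤ b ∧ b < C ∧ pvEnt matrix a b = 0

def pvCells (R C : Int) : List (Int × Int) :=
  (PySem.List.pyRange 0 R 1).flatMap (fun i => (PySem.List.pyRange 0 C 1).map (fun j => (i, j)))

def pvG (matrix : List (List Int)) (R C : Int) (g : List (List Int)) (x : Int × Int) : List (List Int) :=
  if pvEnt matrix x.1 x.2 = 0 then
    pvPairs9.foldl (fun g d =>
      if ¬(d.1 = 0 ∧ d.2 = 0) ∧ 0 ≤ x.1 + d.1 ∧ x.1 + d.1 < R ∧ 0 ≤ x.2 + d.2 ∧ x.2 + d.2 < C then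
        pvBump g (x.1 + d.1) (x.2 + d.2)
      else g) g
  else g

lemma pvShape_bump (g : List (List Int)) (R C i j : Int) (hs : pvShape g R C) :
    pvShape (pvBump g i j) R C := by
  obtain ⟨h1, h2⟩ := hs
  refine ⟨by simpa [pvBump] using h1, ?_⟩
  intro n hn
  simp only [pvBump, List.length_modify] at hn ⊢
  rw [List.getElem_modify]
  split
  · rw [List.length_modify]; exact h2 n hn
  · exact h2 n hn

lemma pvEnt_bump (g : List (List Int)) (R C i j r c : Int) (hs : pvShape g R C)
    (hi : 0 ≤ i) (hiR : i < R) (hj : 0 ≤ j) (hjC : j < C) (hr : 0 ≤ r) (hc : 0 ≤ c) :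
    pvEnt (pvBump g i j) r c = pvEnt g r c + (if r = i ∧ c = j then 1 else 0) := by
  obtain ⟨h1, h2⟩ := hs
  have hiL : i.toNat < g.length := by omega
  have hrow : (g[i.toNat].length : Int) = C := h2 i.toNat hiL
  have hjL : j.toNat < g[i.toNat].length := by omega
  simp only [pvEnt, pvBump, PySem.List.pyGet?_of_nonneg _ hr, PySem.List.pyGet?_of_nonneg _ hc,
    List.getElem?_modify]
  by_cases hri : r = i
  · subst hri
    rw [List.getElem?_eq_getElem hiL]
    by_cases hcj : c = j
    · subst hcj
      simp only [Option.getD_some, List.getElem?_eq_getElem hjL]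
      simp [List.getElem?_eq_getElem hjL]
    · cases hg : g[r.toNat][c.toNat]? with
      | none => simp [hg, hcj, List.getElem?_modify]
      | some v => simp [hg, show ¬j.toNat = c.toNat from by omega, hcj]
  · cases hg : g[r.toNat]? with
    | none => simp [hri]
    | some row => simp [show ¬ i.toNat = r.toNat from by omega, hri]

lemma pvShape_foldP (L : List (Int × Int)) (P : Int × Int → Prop) [DecidablePred P]
    (R C i j : Int) (g : List (List Int)) (hs : pvShape g R C) :
    pvShape (L.foldl (fun g d => if P d then pvBump g (i + d.1) (j + d.2) else g) g) R C := by
  induction L generalizing g with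
  | nil => exact hs
  | cons d L ih =>
    simp only [List.foldl_cons]
    split
    · exact ih _ (pvShape_bump _ _ _ _ _ hs)
    · exact ih _ hs

lemma pvEnt_foldP (L : List (Int × Int)) (P : Int × Int → Prop) [DecidablePred P]
    (R C i j r c : Int)
    (hP : ∀ d, P d → 0 ≤ i + d.1 ∧ i + d.1 < R ∧ 0 ≤ j + d.2 ∧ j + d.2 < C)
    (hr : 0 ≤ r) (hc : 0 ≤ c) :
    ∀ g : List (List Int), pvShape g R C →
    pvEnt (L.foldl (fun g d => if P d then pvBump g (i + d.1) (j + d.2) else g) g) r c =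
      pvEnt g r c + (L.countP (fun d => decide (P d ∧ r = i + d.1 ∧ c = j + d.2)) : Int) := by
  induction L with
  | nil => simp
  | cons d L ih =>
    intro g hs
    simp only [List.foldl_cons, List.countP_cons]
    by_cases hPd : P d
    · obtain ⟨b1, b2, b3, b4⟩ := hP d hPd
      rw [if_pos hPd, ih _ (pvShape_bump _ _ _ _ _ hs),
        pvEnt_bump g R C _ _ r c hs b1 b2 b3 b4 hr hc]
      simp only [decide_eq_true_eq]
      by_cases hhit : r = i + d.1 ∧ c = j + d.2
      · rw [if_pos hhit, if_pos ⟨hPd, hhit⟩]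
        push_cast; ring
      · rw [if_neg hhit, if_neg (by tauto)]
        push_cast; ring
    · rw [if_neg hPd, ih _ hs]
      simp only [decide_eq_true_eq]
      rw [if_neg (by tauto)]
      simp

lemma pvCountP_or (l : List (Int × Int)) (p q : Int × Int → Prop)
    [DecidablePred p] [DecidablePred q] (h : ∀ a ∈ l, ¬(p a ∧ q a)) :
    l.countP (fun a => decide (p a ∨ q a)) =
      l.countP (fun a => decide (p a)) + l.countP (fun a => decide (q a)) := by
  induction l with
  | nil => simp
  | cons a l ih =>
    have hl : ∀ x ∈ l, ¬(p x ∧ q x) := fun x hx => h x (List.mem_cons_of_mem a hx)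
    have ha := h a List.mem_cons_self
    simp only [List.countP_cons, ih hl, decide_eq_true_eq]
    by_cases hp : p a <;> by_cases hq : q a
    · exact absurd ⟨hp, hq⟩ ha
    · rw [if_pos (Or.inl hp), if_pos hp, if_neg hq]; omega
    · rw [if_pos (Or.inr hq), if_neg hp, if_pos hq]; omega
    · rw [if_neg (by tauto), if_neg hp, if_neg hq]; omega

lemma pvShape_G (matrix : List (List Int)) (R C : Int) (g : List (List Int)) (x : Int × Int)
    (hs : pvShape g R C) : pvShape (pvG matrix R C g x) R C := by
  unfold pvG
  split
  · exact pvShape_foldP _ _ R C _ _ _ hs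
  · exact hs

lemma pvScatter_inv (matrix : List (List Int)) (R C : Int) :
    ∀ (S pre : List (Int × Int)) (g : List (List Int)),
    (∀ x ∈ S, 0 ≤ x.1 ∧ x.1 < R ∧ 0 ≤ x.2 ∧ x.2 < C) →
    (∀ x ∈ S, x ∉ pre) → S.Nodup → pvShape g R C →
    (∀ r c : Int, 0 ≤ r → r < R → 0 ≤ c → c < C →
      pvEnt g r c = (pvPairs9.countP (fun d =>
        decide (¬(d.1 = 0 ∧ d.2 = 0) ∧ pvInbZ matrix R C (r - d.1) (c - d.2) ∧ (r - d.1, c - d.2) ∈ pre)) : Int)) →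
    ∀ r c : Int, 0 ≤ r → r < R → 0 ≤ c → c < C →
      pvEnt (S.foldl (pvG matrix R C) g) r c = (pvPairs9.countP (fun d =>
        decide (¬(d.1 = 0 ∧ d.2 = 0) ∧ pvInbZ matrix R C (r - d.1) (c - d.2) ∧ (r - d.1, c - d.2) ∈ pre ++ S)) : Int) := by
  intro S
  induction S with
  | nil =>
    intro pre g _ _ _ hs hbase r c hr hrR hc hcC
    simpa using hbase r c hr hrR hc hcC
  | cons x S ih =>
    obtain ⟨x1, x2⟩ := x
    intro pre g hb hnp hnd hs hbase r c hr hrR hc hcC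
    have hbx := hb (x1, x2) List.mem_cons_self
    have hxp : (x1, x2) ∉ pre := hnp (x1, x2) List.mem_cons_self
    have hbS : ∀ y ∈ S, 0 ≤ y.1 ∧ y.1 < R ∧ 0 ≤ y.2 ∧ y.2 < C :=
      fun y hy => hb y (List.mem_cons_of_mem _ hy)
    have hxS : (x1, x2) ∉ S := (List.nodup_cons.mp hnd).1
    have hnp' : ∀ y ∈ S, y ∉ pre ++ [(x1, x2)] := by
      intro y hy
      simp only [List.mem_append, List.mem_singleton]
      rintro (h | rfl)
      · exact hnp y (List.mem_cons_of_mem _ hy) h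
      · exact hxS hy
    have hkey : ∀ r c : Int, 0 ≤ r → r < R → 0 ≤ c → c < C →
        pvEnt (pvG matrix R C g (x1, x2)) r c = (pvPairs9.countP (fun d =>
          decide (¬(d.1 = 0 ∧ d.2 = 0) ∧ pvInbZ matrix R C (r - d.1) (c - d.2) ∧
            (r - d.1, c - d.2) ∈ pre ++ [(x1, x2)])) : Int) := by
      intro r c hr hrR hc hcC
      by_cases hz : pvEnt matrix x1 x2 = 0
      · rw [pvG, if_pos hz]
        rw [pvEnt_foldP pvPairs9
          (fun d => ¬(d.1 = 0 ∧ d.2 = 0) ∧ 0 ≤ x1 + d.1 ∧ x1 + d.1 < R ∧ 0 ≤ x2 + d.2 ∧ x2 + d.2 < C)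
          R C x1 x2 r c (fun d hd => ⟨hd.2.1, hd.2.2.1, hd.2.2.2.1, hd.2.2.2.2⟩) hr hc g hs,
          hbase r c hr hrR hc hcC]
        have hcongr : (pvPairs9.countP (fun d =>
            decide (¬(d.1 = 0 ∧ d.2 = 0) ∧ pvInbZ matrix R C (r - d.1) (c - d.2) ∧
              (r - d.1, c - d.2) ∈ pre ++ [(x1, x2)]))) =
            pvPairs9.countP (fun d =>
              decide ((¬(d.1 = 0 ∧ d.2 = 0) ∧ pvInbZ matrix R C (r - d.1) (c - d.2) ∧
                (r - d.1, c - d.2) ∈ pre) ∨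
                ((¬(d.1 = 0 ∧ d.2 = 0) ∧ 0 ≤ x1 + d.1 ∧ x1 + d.1 < R ∧ 0 ≤ x2 + d.2 ∧ x2 + d.2 < C) ∧
                  r = x1 + d.1 ∧ c = x2 + d.2))) := by
          refine List.countP_congr ?_
          intro d _
          simp only [decide_eq_true_eq, List.mem_append, List.mem_singleton, Prod.mk.injEq]
          constructor
          · rintro ⟨hA, hM, hmem | ⟨he1, he2⟩⟩
            · exact Or.inl ⟨hA, hM, hmem⟩
            · exact Or.inr ⟨⟨hA, by omega, by omega, by omega, by omega⟩, by omega, by omega⟩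
          · rintro (⟨hA, hM, hmem⟩ | ⟨⟨hA, hb1, hb2, hb3, hb4⟩, he1, he2⟩)
            · exact ⟨hA, hM, Or.inl hmem⟩
            · have e1 : r - d.1 = x1 := by omega
              have e2 : c - d.2 = x2 := by omega
              refine ⟨hA, ?_, Or.inr ⟨e1, e2⟩⟩
              rw [e1, e2]
              exact ⟨hbx.1, hbx.2.1, hbx.2.2.1, hbx.2.2.2, hz⟩
        have hdisj : ∀ d ∈ pvPairs9,
            ¬((¬(d.1 = 0 ∧ d.2 = 0) ∧ pvInbZ matrix R C (r - d.1) (c - d.2) ∧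
              (r - d.1, c - d.2) ∈ pre) ∧
              ((¬(d.1 = 0 ∧ d.2 = 0) ∧ 0 ≤ x1 + d.1 ∧ x1 + d.1 < R ∧ 0 ≤ x2 + d.2 ∧ x2 + d.2 < C) ∧
                r = x1 + d.1 ∧ c = x2 + d.2)) := by
          rintro d _ ⟨⟨_, _, hmem⟩, ⟨_, he1, he2⟩⟩
          have e1 : r - d.1 = x1 := by omega
          have e2 : c - d.2 = x2 := by omega
          rw [e1, e2] at hmem
          exact hxp hmem
        rw [hcongr, pvCountP_or _ _ _ hdisj]
        push_cast
        ring
      · rw [pvG, if_neg hz, hbase r c hr hrR hc hcC]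
        congr 1
        refine List.countP_congr ?_
        intro d _
        simp only [decide_eq_true_eq, List.mem_append, List.mem_singleton, Prod.mk.injEq]
        constructor
        · rintro ⟨hA, hM, hmem⟩
          exact ⟨hA, hM, Or.inl hmem⟩
        · rintro ⟨hA, hM, hmem | ⟨he1, he2⟩⟩
          · exact ⟨hA, hM, hmem⟩
          · exfalso
            apply hz
            have e1 : x1 = r - d.1 := by omega
            have e2 : x2 = c - d.2 := by omega
            rw [e1, e2]
            exact hM.2.2.2.2
    rw [List.foldl_cons, List.append_cons]
    exact ih (pre ++ [(x1, x2)]) (pvG matrix R C g (x1, x2)) hbS hnp' (List.nodup_cons.mp hnd).2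
      (pvShape_G _ _ _ _ _ hs) hkey r c hr hrR hc hcC

lemma pvMem_cells (R C : Int) (p : Int × Int) :
    p ∈ pvCells R C ↔ 0 ≤ p.1 ∧ p.1 < R ∧ 0 ≤ p.2 ∧ p.2 < C := by
  obtain ⟨a, b⟩ := p
  simp only [pvCells, List.mem_flatMap, List.mem_map, PySem.List.mem_pyRange_one, Prod.mk.injEq]
  constructor
  · rintro ⟨i, hi, j, hj, rfl, rfl⟩
    exact ⟨hi.1, hi.2, hj.1, hj.2⟩
  · rintro ⟨h1, h2, h3, h4⟩
    exact ⟨a, ⟨h1, h2⟩, b, ⟨h3, h4⟩, rfl, rfl⟩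

lemma pvNodup_cells (R C : Int) : (pvCells R C).Nodup := by
  unfold pvCells
  rw [List.nodup_flatMap]
  constructor
  · intro i _
    exact (PySem.List.nodup_pyRange_one 0 C).map (fun a b hab => by simpa using hab)
  · refine List.Nodup.pairwise_of_forall_ne (PySem.List.nodup_pyRange_one 0 R) ?_
    intro a _ b _ hne x hxa hxb
    simp only [List.mem_map] at hxa hxb
    obtain ⟨ja, _, rfl⟩ := hxa
    obtain ⟨jb, _, hx⟩ := hxb
    exact hne (by simpa using congrArg Prod.fst hx.symm)

lemma pvReflect (Q : Int → Int → Prop) [inst : ∀ a b, Decidable (Q a b)] (r c : Int) :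
    pvPairs9.countP (fun d => decide (¬(d.1 = 0 ∧ d.2 = 0) ∧ Q (r - d.1) (c - d.2))) =
      pvDirs.countP (fun d => decide (Q (r + d.1) (c + d.2))) := by
  have hperm : pvPairs9.Perm ((0, 0) :: pvDirs.map (fun d => (-d.1, -d.2))) := by decide
  have hnz : ∀ d ∈ pvDirs, d.1 ≠ 0 ∨ d.2 ≠ 0 := by decide
  rw [hperm.countP_congr (fun x _ => rfl), List.countP_cons, List.countP_map]
  have h0 : (decide (¬((0 : Int) = 0 ∧ (0 : Int) = 0) ∧ Q (r - 0) (c - 0))) = false := by simp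
  rw [h0]
  simp only [if_neg (by simp : ¬(false = true)), add_zero]
  refine List.countP_congr ?_
  intro d hd
  simp only [Function.comp, decide_eq_true_eq, sub_neg_eq_add, neg_eq_zero]
  constructor
  · rintro ⟨_, hQ⟩; exact hQ
  · intro hQ
    refine ⟨?_, hQ⟩
    rcases hnz d hd with h | h <;> tauto

-- the grid built by port B's first two passes has as entry (r,c) exactly A's Zero_Count at (r,c)
lemma pvGrid_char (matrix : List (List Int)) (r c : Int)
    (hr : 0 ≤ r) (hrR : r < (matrix.length : Int)) (hc : 0 ≤ c)
    (hcC : c < (((PySem.List.pyGet? matrix 0).getD []).length : Int)) :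
    pvEnt ((PySem.List.pyRange 0 (matrix.length : Int) 1).foldl (fun g r =>
      (PySem.List.pyRange 0 (((PySem.List.pyGet? matrix 0).getD []).length : Int) 1).foldl (fun g c =>
        if (PySem.List.pyGet? ((PySem.List.pyGet? matrix r).getD []) c).getD 0 = 0 then
          pvOffs.foldl (fun g dr =>
            pvOffs.foldl (fun g dc =>
              if ¬(dr = 0 ∧ dc = 0) ∧ 0 ≤ r + dr ∧ r + dr < (matrix.length : Int) ∧ 0 ≤ c + dc ∧
                  c + dc < (((PySem.List.pyGet? matrix 0).getD []).length : Int) then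
                pvBump g (r + dr) (c + dc)
              else g) g) g
        else g) g)
      (List.replicate (matrix.length : Int).toNat
        (List.replicate (((PySem.List.pyGet? matrix 0).getD []).length : Int).toNat (0 : Int)))) r c =
    (pvDirs.countP (fun d =>
      decide (0 ≤ r + d.1 ∧ r + d.1 < (matrix.length : Int) ∧ 0 ≤ c + d.2 ∧
        c + d.2 < (((PySem.List.pyGet? matrix 0).getD []).length : Int) ∧
        pvEnt matrix (r + d.1) (c + d.2) = 0)) : Int) := by
  set R := (matrix.length : Int) with hR
  set C := (((PySem.List.pyGet? matrix 0).getD []).length : Int) with hC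
  have hR0 : 0 ≤ R := by rw [hR]; positivity
  have hC0 : 0 ≤ C := by rw [hC]; positivity
  set grid0 : List (List Int) := List.replicate R.toNat (List.replicate C.toNat (0 : Int)) with hg0
  have hbridge : ((PySem.List.pyRange 0 R 1).foldl (fun g r =>
      (PySem.List.pyRange 0 C 1).foldl (fun g c =>
        if (PySem.List.pyGet? ((PySem.List.pyGet? matrix r).getD []) c).getD 0 = 0 then
          pvOffs.foldl (fun g dr =>
            pvOffs.foldl (fun g dc =>
              if ¬(dr = 0 ∧ dc = 0) ∧ 0 ≤ r + dr ∧ r + dr < R ∧ 0 ≤ c + dc ∧ c + dc < C then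
                pvBump g (r + dr) (c + dc)
              else g) g) g
        else g) g) grid0) = (pvCells R C).foldl (pvG matrix R C) grid0 := by
    rw [pvCells, List.foldl_flatMap]
    simp only [List.foldl_map]
    rfl
  have hshape0 : pvShape grid0 R C := by
    constructor
    · simp [hg0]; omega
    · intro n hn
      simp only [hg0, List.getElem_replicate, List.length_replicate]
      omega
  have hbase : ∀ r c : Int, 0 ≤ r → r < R → 0 ≤ c → c < C →
      pvEnt grid0 r c = (pvPairs9.countP (fun d =>
        decide (¬(d.1 = 0 ∧ d.2 = 0) ∧ pvInbZ matrix R C (r - d.1) (c - d.2) ∧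
          (r - d.1, c - d.2) ∈ ([] : List (Int × Int)))) : Int) := by
    intro r c hr hrR hc hcC
    rw [List.countP_eq_zero.mpr (fun d _ => by simp)]
    simp only [hg0, pvEnt, PySem.List.pyGet?_of_nonneg _ hr, PySem.List.pyGet?_of_nonneg _ hc,
      List.getElem?_replicate]
    rw [if_pos (by omega : r.toNat < R.toNat)]
    simp only [Option.getD_some, List.getElem?_replicate]
    rw [if_pos (by omega : c.toNat < C.toNat)]
    simp
  have hinv := pvScatter_inv matrix R C (pvCells R C) [] grid0
    (fun x hx => (pvMem_cells R C x).mp hx) (by simp) (pvNodup_cells R C) hshape0 hbase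
    r c hr hrR hc hcC
  rw [hbridge, hinv]
  have hdrop : (pvPairs9.countP (fun d =>
      decide (¬(d.1 = 0 ∧ d.2 = 0) ∧ pvInbZ matrix R C (r - d.1) (c - d.2) ∧
        (r - d.1, c - d.2) ∈ ([] : List (Int × Int)) ++ pvCells R C))) =
      pvPairs9.countP (fun d =>
        decide (¬(d.1 = 0 ∧ d.2 = 0) ∧ pvInbZ matrix R C (r - d.1) (c - d.2))) := by
    refine List.countP_congr ?_
    intro d _
    simp only [List.nil_append, decide_eq_true_eq]
    constructor
    · rintro ⟨hA, hM, _⟩; exact ⟨hA, hM⟩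
    · rintro ⟨hA, hM⟩
      exact ⟨hA, hM, (pvMem_cells R C _).mpr ⟨hM.1, hM.2.1, hM.2.2.1, hM.2.2.2.1⟩⟩
  rw [hdrop, pvReflect (fun a b => pvInbZ matrix R C a b) r c]

-- ===== VERDICT (by name: the statement is the Claim_ definition above) =====
lemma pvEnt_eq (g : List (List Int)) (r c : Int) :
    (PySem.List.pyGet? ((PySem.List.pyGet? g r).getD []) c).getD 0 = pvEnt g r c := rfl

lemma pvIsEven_eq (matrix : List (List Int)) (r c : Int) :
    isEvenZeroSurrounding matrix r c = decide (PySem.Int.mod ((pvDirs.countP (fun d =>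
      decide (0 ≤ r + d.1 ∧ r + d.1 < (matrix.length : Int) ∧ 0 ≤ c + d.2 ∧
        c + d.2 < (((PySem.List.pyGet? matrix 0).getD []).length : Int) ∧
        pvEnt matrix (r + d.1) (c + d.2) = 0)) : Int)) 2 = 0) := by
  unfold isEvenZeroSurrounding
  rw [PySem.List.foldl_ite_add_one (p := fun d : Int × Int =>
    0 ≤ r + d.1 ∧ r + d.1 < (matrix.length : Int) ∧ 0 ≤ c + d.2 ∧
      c + d.2 < (((PySem.List.pyGet? matrix 0).getD []).length : Int) ∧
      (PySem.List.pyGet? ((PySem.List.pyGet? matrix (r + d.1)).getD []) (c + d.2)).getD 0 = 0) pvDirs 0]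
  simp only [zero_add]
  rfl

-- ===== VERDICT (by name: the statement is the Claim_ definition above) =====
theorem SurroundByOnes_spec : Claim_equal_SurroundByOnes := by
  intro matrix _ _
  unfold Spec_SurroundByOnes SurroundByOnes SurroundByOnes_alt
  simp only []
  by_cases h0 : matrix.length = 0
  · rw [List.length_eq_zero_iff] at h0
    subst h0
    rfl
  by_cases h11 : matrix.length = 1 ∧ ((PySem.List.pyGet? matrix 0).getD []).length = 1
  · rw [if_pos h11, if_neg (show ¬((matrix.length : Int) = 0) from by exact_mod_cast h0),
      if_pos (show (matrix.length : Int) = 1 ∧ (((PySem.List.pyGet? matrix 0).getD []).length : Int) = 1 from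
        by exact_mod_cast h11)]
  · rw [if_neg h11, if_neg (show ¬((matrix.length : Int) = 0) from by exact_mod_cast h0),
      if_neg (show ¬((matrix.length : Int) = 1 ∧ (((PySem.List.pyGet? matrix 0).getD []).length : Int) = 1) from by
        intro h; exact h11 (by exact_mod_cast h))]
    refine PySem.List.foldl_congr_mem _ _ _ _ ?_
    intro count r hrm
    have hr := PySem.List.mem_pyRange_one.mp hrm
    refine PySem.List.foldl_congr_mem _ _ _ _ ?_
    intro cnt c hcm
    have hc := PySem.List.mem_pyRange_one.mp hcm
    have hgrid := pvGrid_char matrix r c hr.1 hr.2 hc.1 hc.2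
    simp only [pvEnt_eq] at hgrid ⊢
    by_cases h1 : pvEnt matrix r c = 1
    · rw [if_pos h1]
      refine if_congr ?_ rfl rfl
      rw [pvIsEven_eq, hgrid]
      simp only [decide_eq_true_eq]
      constructor
      · intro hm; exact ⟨h1, hm⟩
      · intro hm; exact hm.2
    · rw [if_neg h1, if_neg (fun hh => h1 hh.1)]
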